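-- pv_equiv track=rewrite | github.com/Eshco93/dxlAPRS-SHUE | SondeHubUploader.py | check_user_callsign
-- ===== SOURCE A (Python) =====
-- def check_user_callsign(user_callsign):
--     capital_letters = 'ABCDEFGHIJKLMNOPQRSTUVWXYZ'
--     lowercase_letters = 'abcdefghijklmnopqrstuvwxyz'
--     numbers = '0123456789'
--     special_characters = '-_'
--
--     if(len(user_callsign) <= 15):
--         if all(c in (capital_letters + lowercase_letters + numbers + special_characters) for c in user_callsign):
--             return True
--     return False
-- ===== SOURCE B (Python) =====
-- import re
--
-- _CALLSIGN_RE = re.compile(r'[A-Za-z0-9_-]{0,15}')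
--
-- def check_user_callsign(user_callsign):
--     return bool(_CALLSIGN_RE.fullmatch(user_callsign))
-- ===== Notes on version B (the rewrite author's own statement) =====
-- stated objective: idiomatic
-- what changed: Replaced the explicit length check plus all()-membership scan over a concatenated alphabet string with a single precompiled anchored regex fullmatch of [A-Za-z0-9_-]{0,15}.
import Mathlib
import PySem

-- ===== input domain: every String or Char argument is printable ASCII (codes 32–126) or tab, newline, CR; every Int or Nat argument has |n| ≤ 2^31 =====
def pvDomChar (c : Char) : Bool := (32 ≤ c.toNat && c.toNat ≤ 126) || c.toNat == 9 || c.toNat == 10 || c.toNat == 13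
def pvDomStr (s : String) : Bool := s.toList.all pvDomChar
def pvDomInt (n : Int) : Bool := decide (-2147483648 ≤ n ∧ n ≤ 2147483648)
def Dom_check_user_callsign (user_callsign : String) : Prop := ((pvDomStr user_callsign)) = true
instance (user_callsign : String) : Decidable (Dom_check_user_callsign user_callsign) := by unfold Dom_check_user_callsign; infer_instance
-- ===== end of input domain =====

-- B replaces A's length check + all()-membership scan by one anchored regex fullmatch
-- of [A-Za-z0-9_-]{0,15} (ported by hand, exact on this pattern: character class with
-- bounded repetition consumed by structural recursion). Objective: idiomatic.


-- ===== PORT A =====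
def check_user_callsign (user_callsign : String) : Bool :=
  let capital_letters := "ABCDEFGHIJKLMNOPQRSTUVWXYZ"
  let lowercase_letters := "abcdefghijklmnopqrstuvwxyz"
  let numbers := "0123456789"
  let special_characters := "-_"
  if PySem.Str.len user_callsign ≤ 15 then
    -- Python's 'c in <str>' for a single character c is exactly character membership
    if user_callsign.toList.all
        (fun c => (capital_letters ++ lowercase_letters ++ numbers ++ special_characters).toList.contains c) then
      true
    else false
  else false

-- ===== PORT B =====
-- the character class [A-Za-z0-9_-] of the regex
def pvCsClass (c : Char) : Bool :=
  ('A' ≤ c && c ≤ 'Z') || ('a' ≤ c && c ≤ 'z') || ('0' ≤ c && c ≤ '9') || c == '_' || c == '-'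

-- regex engine for the anchored pattern [A-Za-z0-9_-]{0,n}: consume class characters,
-- at most n of them, and accept iff the whole input is consumed (fullmatch)
def pvFullmatch : List Char → Nat → Bool
  | [], _ => true
  | c :: rest, Nat.succ n => pvCsClass c && pvFullmatch rest n
  | _ :: _, 0 => false

def check_user_callsign_alt (user_callsign : String) : Bool :=
  pvFullmatch user_callsign.toList 15

-- ===== PRECONDITION & SPEC =====
def Spec_check_user_callsign (user_callsign : String) (out : Bool) : Prop := out = check_user_callsign_alt user_callsign
instance (user_callsign : String) (out : Bool) : Decidable (Spec_check_user_callsign user_callsign out) := by unfold Spec_check_user_callsign; infer_instance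

-- ===== CLAIM (what is proved, stated in full; the proofs are below) =====
def Claim_equal_check_user_callsign : Prop := ∀ (user_callsign : String), Dom_check_user_callsign user_callsign → Spec_check_user_callsign user_callsign (check_user_callsign user_callsign)

-- ===== LEMMAS AND PROOFS =====

-- the concatenated alphabet string of A, as a character list
set_option maxRecDepth 8192 in
lemma pv_alph_toList :
    (("ABCDEFGHIJKLMNOPQRSTUVWXYZ" ++ "abcdefghijklmnopqrstuvwxyz" ++ "0123456789" ++ "-_") : String).toList
      = ['A', 'B', 'C', 'D', 'E', 'F', 'G', 'H', 'I', 'J', 'K', 'L', 'M', 'N', 'O', 'P', 'Q', 'R', 'S', 'T', 'U', 'V', 'W', 'X', 'Y', 'Z', 'a', 'b', 'c', 'd', 'e', 'f', 'g', 'h', 'i', 'j', 'k', 'l', 'm', 'n', 'o', 'p', 'q', 'r', 's', 't', 'u', 'v', 'w', 'x', 'y', 'z', '0', '1', '2', '3', '4', '5', '6', '7', '8', '9', '-', '_'] := by decide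

-- on every character of the input domain, membership in A's concatenated alphabet
-- equals B's regex character class
set_option maxRecDepth 8192 in
lemma pv_charmem (c : Char) (h : pvDomChar c = true) :
    (("ABCDEFGHIJKLMNOPQRSTUVWXYZ" ++ "abcdefghijklmnopqrstuvwxyz" ++ "0123456789" ++ "-_") : String).toList.contains c
      = pvCsClass c := by
  have hn : c.toNat < 127 := by
    simp only [pvDomChar, Bool.or_eq_true, Bool.and_eq_true, decide_eq_true_eq, beq_iff_eq] at h
    omega
  rw [pv_alph_toList]
  have key : ∀ n : Nat, n < 127 →
      (['A', 'B', 'C', 'D', 'E', 'F', 'G', 'H', 'I', 'J', 'K', 'L', 'M', 'N', 'O', 'P', 'Q', 'R', 'S', 'T', 'U', 'V', 'W', 'X', 'Y', 'Z', 'a', 'b', 'c', 'd', 'e', 'f', 'g', 'h', 'i', 'j', 'k', 'l', 'm', 'n', 'o', 'p', 'q', 'r', 's', 't', 'u', 'v', 'w', 'x', 'y', 'z', '0', '1', '2', '3', '4', '5', '6', '7', '8', '9', '-', '_'] : List Char).contains (Char.ofNat n) = pvCsClass (Char.ofNat n) := by decide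
  have := key c.toNat hn
  rwa [Char.ofNat_toNat] at this

-- B's bounded fullmatch = length bound together with the character-class scan
lemma pv_fullmatch_eq (cs : List Char) (n : Nat) :
    pvFullmatch cs n = (decide (cs.length ≤ n) && cs.all pvCsClass) := by
  induction cs generalizing n with
  | nil => simp [pvFullmatch]
  | cons c rest ih =>
      cases n with
      | zero => simp [pvFullmatch]
      | succ n =>
          simp [pvFullmatch, ih]
          by_cases h1 : pvCsClass c <;> by_cases h2 : rest.length ≤ n <;>
            simp [h1, h2, Bool.and_comm]

-- ===== VERDICT (by name: the statement is the Claim_ definition above) =====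
theorem check_user_callsign_spec : Claim_equal_check_user_callsign := by
  intro s hdom
  unfold Spec_check_user_callsign check_user_callsign check_user_callsign_alt
  have hall : s.toList.all
      (fun c => (("ABCDEFGHIJKLMNOPQRSTUVWXYZ" ++ "abcdefghijklmnopqrstuvwxyz" ++ "0123456789" ++ "-_") : String).toList.contains c)
      = s.toList.all pvCsClass := by
    have hmem : ∀ c ∈ s.toList,
        (("ABCDEFGHIJKLMNOPQRSTUVWXYZ" ++ "abcdefghijklmnopqrstuvwxyz" ++ "0123456789" ++ "-_") : String).toList.contains c
          = pvCsClass c := by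
      intro c hc
      apply pv_charmem
      have := (List.all_eq_true.mp hdom) c hc
      simpa using this
    rw [Bool.eq_iff_iff]
    simp only [List.all_eq_true]
    constructor <;> intro h c hc
    · rw [← hmem c hc]; exact h c hc
    · rw [hmem c hc]; exact h c hc
  rw [pv_fullmatch_eq, ← hall]
  by_cases hlen : s.toList.length ≤ 15
  · have h1 : PySem.Str.len s ≤ 15 := by rw [PySem.Str.len_eq]; exact_mod_cast hlen
    rw [if_pos h1, decide_eq_true hlen, Bool.true_and]
    by_cases hA : (s.toList.all fun c =>
        ("ABCDEFGHIJKLMNOPQRSTUVWXYZ" ++ "abcdefghijklmnopqrstuvwxyz" ++ "0123456789" ++ "-_").toList.contains c) = true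
    · rw [if_pos hA, hA]
    · have hA' : (s.toList.all fun c =>
          ("ABCDEFGHIJKLMNOPQRSTUVWXYZ" ++ "abcdefghijklmnopqrstuvwxyz" ++ "0123456789" ++ "-_").toList.contains c) = false := by
        simpa using hA
      rw [if_neg hA, hA']
  · have h1 : ¬ PySem.Str.len s ≤ 15 := by rw [PySem.Str.len_eq]; exact_mod_cast hlen
    rw [if_neg h1, decide_eq_false hlen, Bool.false_and]
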